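-- pv_equiv track=rewrite | github.com/iZelikov/beegeek-algo | task_10_2.py | happy_tickets_2
-- ===== SOURCE A (Python) =====
-- from collections import defaultdict, Counter
--
-- def happy_tickets_2(n):
--     count = 0
--     counts = defaultdict(int)
--     for a in range(min(n + 1, 10)):
--         for b in range(min(n + 1 - a, 10)):
--             counts[a + b] += 1
--
--     for k, v in counts.items():
--         count += counts.get(n - k, 0) * v
--
--     return count ** 2
-- ===== SOURCE B (Python) =====
-- def happy_tickets_2(n):
--     # C(m,3), taken as 0 for m < 3
--     def c3(m):
--         return m * (m - 1) * (m - 2) // 6 if m >= 3 else 0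
--     # number of ordered 4-tuples of digits 0-9 summing to n, by inclusion-exclusion
--     t = c3(n + 3) - 4 * c3(n - 7) + 6 * c3(n - 17) - 4 * c3(n - 27) + c3(n - 37)
--     return t * t
-- ===== Notes on version B (the rewrite author's own statement) =====
-- stated objective: simpler
-- what changed: Replaced the defaultdict pair-sum convolution (two nested loops building a table, then a scan pairing complementary sums) by a closed-form inclusion-exclusion formula counting digit quadruples with the given sum, squared.
import Mathlib
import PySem

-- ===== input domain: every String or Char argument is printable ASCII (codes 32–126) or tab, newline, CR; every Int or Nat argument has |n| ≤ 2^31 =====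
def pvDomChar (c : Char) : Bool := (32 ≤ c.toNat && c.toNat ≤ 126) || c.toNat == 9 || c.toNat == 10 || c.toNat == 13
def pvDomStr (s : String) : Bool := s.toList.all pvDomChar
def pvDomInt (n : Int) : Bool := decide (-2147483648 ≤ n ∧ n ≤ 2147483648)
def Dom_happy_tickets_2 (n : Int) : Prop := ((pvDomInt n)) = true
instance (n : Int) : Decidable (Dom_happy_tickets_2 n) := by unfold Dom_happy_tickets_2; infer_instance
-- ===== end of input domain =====

-- B replaces A's defaultdict pair-sum convolution by a closed-form
-- inclusion-exclusion count of digit quadruples with the given sum, squared (objective: simpler).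

-- ===== PORT A =====
def happy_tickets_2 (n : Int) : Int :=
  let counts : PySem.Dict Int Int :=
    (PySem.List.pyRange 0 (min (n + 1) 10) 1).foldl (fun counts a =>
      (PySem.List.pyRange 0 (min (n + 1 - a) 10) 1).foldl (fun counts b =>
        counts.modify (a + b) 0 (· + 1)) counts) PySem.Dict.empty
  let count : Int := counts.items.foldl (fun count kv =>
      count + ((counts.get? (n - kv.1)).getD 0) * kv.2) 0
  count ^ 2

-- ===== PORT B =====
-- C(m,3), taken as 0 for m < 3
def pyC3 (m : Int) : Int :=
  if 3 ≤ m then PySem.Int.floordiv (m * (m - 1) * (m - 2)) 6 else 0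

def happy_tickets_2_alt (n : Int) : Int :=
  let t := pyC3 (n + 3) - 4 * pyC3 (n - 7) + 6 * pyC3 (n - 17) - 4 * pyC3 (n - 27) + pyC3 (n - 37)
  t * t

-- ===== PRECONDITION & SPEC =====
def Spec_happy_tickets_2 (n : Int) (out : Int) : Prop := out = happy_tickets_2_alt n
instance (n : Int) (out : Int) : Decidable (Spec_happy_tickets_2 n out) := by unfold Spec_happy_tickets_2; infer_instance

-- ===== CLAIM (what is proved, stated in full; the proofs are below) =====
def Claim_equal_happy_tickets_2 : Prop := ∀ (n : Int), Dom_happy_tickets_2 n → Spec_happy_tickets_2 n (happy_tickets_2 n)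

-- ===== LEMMAS AND PROOFS =====

-- the pair-sum table A builds once n ≥ 19 (both loop bounds saturate at 10)
def pvTbl : PySem.Dict Int Int :=
  PySem.Dict.ofList [(0,1),(1,2),(2,3),(3,4),(4,5),(5,6),(6,7),(7,8),(8,9),(9,10),
                     (10,9),(11,8),(12,7),(13,6),(14,5),(15,4),(16,3),(17,2),(18,1)]

theorem pvTbl_get_zero (x : Int) (hx : 19 ≤ x) : ((pvTbl.get? x).getD 0 : Int) = 0 := by
  have hkeys : pvTbl.keys = [0,1,2,3,4,5,6,7,8,9,10,11,12,13,14,15,16,17,18] := by decide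
  have hmem : x ∉ pvTbl.keys := by
    rw [hkeys]
    simp only [List.mem_cons, List.not_mem_nil, or_false]
    omega
  rw [(PySem.Dict.get?_eq_none_iff_not_mem_keys pvTbl x).mpr hmem]
  rfl

-- an accumulate loop whose every contribution is 0 returns its initial value
theorem pvFoldZero (f : Int → Int × Int → Int) (L : List (Int × Int))
    (h : ∀ (c : Int) (p : Int × Int), p ∈ L → f c p = c) :
    ∀ c : Int, L.foldl f c = c := by
  induction L with
  | nil => intro c; rfl
  | cons p t ih =>
    intro c
    simp only [List.foldl_cons]
    rw [h c p (List.mem_cons_self)]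
    exact ih (fun c q hq => h c q (List.mem_cons_of_mem _ hq)) c

theorem pvSixDvd (k : Int) : (6 : Int) ∣ k * (k - 1) * (k - 2) := by
  obtain ⟨q, hq⟩ : ∃ q, k = 6 * q + k % 6 := ⟨k / 6, by omega⟩
  have hr : k % 6 = 0 ∨ k % 6 = 1 ∨ k % 6 = 2 ∨ k % 6 = 3 ∨ k % 6 = 4 ∨ k % 6 = 5 := by omega
  rcases hr with h | h | h | h | h | h <;> rw [h] at hq <;> subst hq
  · exact ⟨q * (6 * q - 1) * (6 * q - 2), by ring⟩
  · exact ⟨q * (6 * q + 1) * (6 * q - 1), by ring⟩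
  · exact ⟨q * (6 * q + 2) * (6 * q + 1), by ring⟩
  · exact ⟨(2 * q + 1) * (3 * q + 1) * (6 * q + 1), by ring⟩
  · exact ⟨(3 * q + 2) * (2 * q + 1) * (6 * q + 2), by ring⟩
  · exact ⟨(6 * q + 5) * (3 * q + 2) * (2 * q + 1), by ring⟩

theorem pvC3_mul_six (m : Int) (h : 3 ≤ m) : 6 * pyC3 m = m * (m - 1) * (m - 2) := by
  unfold pyC3
  rw [if_pos h, PySem.Int.floordiv_eq_ediv_of_pos (by norm_num)]
  exact Int.mul_ediv_cancel' (pvSixDvd m)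

-- once n ≥ 19 both range bounds saturate at 10 and A builds the fixed table pvTbl
set_option maxRecDepth 200000 in
theorem pvCountsConst (n : Int) (h : 19 ≤ n) :
    (PySem.List.pyRange 0 (min (n + 1) 10) 1).foldl (fun counts a =>
      (PySem.List.pyRange 0 (min (n + 1 - a) 10) 1).foldl (fun counts b =>
        counts.modify (a + b) 0 (· + 1)) counts) PySem.Dict.empty = pvTbl := by
  rw [show min (n + 1) 10 = (10 : Int) by omega]
  calc _ = List.foldl (fun (counts : PySem.Dict Int Int) (a : Int) =>
            (PySem.List.pyRange 0 10 1).foldl (fun counts b =>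
              counts.modify (a + b) 0 (· + 1)) counts) PySem.Dict.empty
            (PySem.List.pyRange 0 10 1) :=
        PySem.List.foldl_congr_mem _ _ _ _ (fun acc x hx => by
          have hx' := PySem.List.mem_pyRange_one.mp hx
          rw [show min (n + 1 - x) 10 = (10 : Int) by omega])
    _ = pvTbl := by decide

theorem pvKeysSmall : ∀ p ∈ pvTbl.items, 0 ≤ p.1 ∧ p.1 ≤ 18 := by decide

set_option maxRecDepth 200000 in
theorem happy_tickets_2_spec : Claim_equal_happy_tickets_2 := by
  intro n _
  unfold Spec_happy_tickets_2
  rcases lt_trichotomy n 0 with hneg | h0 | hpos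
  · -- n < 0 : both ranges are empty and all five binomial arguments are below 3
    simp only [happy_tickets_2, happy_tickets_2_alt, pyC3]
    rw [PySem.List.pyRange_one_eq_nil (show min (n + 1) 10 ≤ 0 by omega)]
    rw [if_neg (by omega : ¬ (3:Int) ≤ n + 3), if_neg (by omega : ¬ (3:Int) ≤ n - 7),
        if_neg (by omega : ¬ (3:Int) ≤ n - 17), if_neg (by omega : ¬ (3:Int) ≤ n - 27),
        if_neg (by omega : ¬ (3:Int) ≤ n - 37)]
    rw [List.foldl_nil]
    have hz : List.foldl (fun (count : Int) (kv : Int × Int) =>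
        count + (((PySem.Dict.empty : PySem.Dict Int Int).get? (n - kv.1)).getD 0) * kv.2)
        0 (PySem.Dict.empty : PySem.Dict Int Int).items = 0 := rfl
    rw [hz]
    norm_num
  · subst h0; decide
  · rcases le_or_gt n 39 with hle | hgt
    · -- 1 ≤ n ≤ 39 : finitely many cases, checked by evaluation
      interval_cases n <;> decide
    · -- n ≥ 40 : A's table holds only pair sums ≤ 18, so every lookup of n - k misses
      -- and A returns 0; B's alternating sum is the vanishing 4th finite difference of a cubic
      simp only [happy_tickets_2]
      rw [pvCountsConst n (by omega)]
      have hfold : List.foldl (fun count kv =>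
          count + ((pvTbl.get? (n - kv.1)).getD 0) * kv.2) 0 pvTbl.items = 0 :=
        pvFoldZero _ _ (fun c p hp => by
          have hk := pvKeysSmall p hp
          show c + ((pvTbl.get? (n - p.1)).getD 0) * p.2 = c
          rw [pvTbl_get_zero (n - p.1) (by omega)]
          ring) 0
      rw [hfold]
      simp only [happy_tickets_2_alt]
      have e1 := pvC3_mul_six (n + 3) (by omega)
      have e2 := pvC3_mul_six (n - 7) (by omega)
      have e3 := pvC3_mul_six (n - 17) (by omega)
      have e4 := pvC3_mul_six (n - 27) (by omega)
      have e5 := pvC3_mul_six (n - 37) (by omega)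
      have ht : pyC3 (n + 3) - 4 * pyC3 (n - 7) + 6 * pyC3 (n - 17) - 4 * pyC3 (n - 27)
          + pyC3 (n - 37) = 0 := by linarith [e1, e2, e3, e4, e5]
      rw [ht]
      norm_num
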